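-- pv_equiv track=rewrite | github.com/akmedat01/a-maze-ing-1337 | Display/visualizing_maze.py | build_42_pattern
-- ===== SOURCE A (Python) =====
-- from typing import Any, Dict, Generator, List, Optional, Set, Tuple
--
-- Coord = Tuple[int, int]
--
-- def build_42_pattern(height: int, width: int) -> Optional[List[Coord]]:
--     """Return maze-cell coords forming the '42' digits, centred."""
--     pat_h, pat_w = 7, 11
--     if height < pat_h + 2 or width < pat_w + 2:
--         return None
--
--     sr = (height - pat_h) // 2
--     sc = (width - pat_w) // 2
--
--     digit_4: List[Tuple[int, int]] = [
--         (0, 0),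
--         (1, 0),
--         (2, 0), (2, 2),
--         (3, 0), (3, 1), (3, 2), (3, 3), (3, 4),
--         (4, 2),
--         (5, 2),
--         (6, 2),
--     ]
--     digit_2: List[Tuple[int, int]] = [
--         (0, 0), (0, 1), (0, 2), (0, 3), (0, 4),
--         (1, 4),
--         (2, 4),
--         (3, 0), (3, 1), (3, 2), (3, 3), (3, 4),
--         (4, 0),
--         (5, 0),
--         (6, 0), (6, 1), (6, 2), (6, 3), (6, 4),
--     ]
--
--     cells: List[Coord] = []
--     for dr, dc in digit_4:
--         cells.append((sr + dr, sc + dc))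
--     for dr, dc in digit_2:
--         cells.append((sr + dr, sc + 6 + dc))
--     return cells
-- ===== SOURCE B (Python) =====
-- DIGIT_4 = [
--     "#",
--     "#",
--     "#.#",
--     "#####",
--     "..#",
--     "..#",
--     "..#",
-- ]
-- DIGIT_2 = [
--     "#####",
--     "....#",
--     "....#",
--     "#####",
--     "#",
--     "#",
--     "#####",
-- ]
--
-- def build_42_pattern(height, width):
--     """Return maze-cell coords forming the '42' digits, centred."""
--     if height < 9 or width < 13:
--         return None
--     sr = (height - 7) // 2
--     sc = (width - 11) // 2
--     cells = []
--     for off, bitmap in ((0, DIGIT_4), (6, DIGIT_2)):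
--         for r, row in enumerate(bitmap):
--             for c, ch in enumerate(row):
--                 if ch == '#':
--                     cells.append((sr + r, sc + off + c))
--     return cells
-- ===== Notes on version B (the rewrite author's own statement) =====
-- stated objective: idiomatic
-- what changed: B replaces A's hand-enumerated coordinate lists with two multiline string bitmaps scanned row by row, appending a cell wherever the bitmap char is '#'.
import Mathlib
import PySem

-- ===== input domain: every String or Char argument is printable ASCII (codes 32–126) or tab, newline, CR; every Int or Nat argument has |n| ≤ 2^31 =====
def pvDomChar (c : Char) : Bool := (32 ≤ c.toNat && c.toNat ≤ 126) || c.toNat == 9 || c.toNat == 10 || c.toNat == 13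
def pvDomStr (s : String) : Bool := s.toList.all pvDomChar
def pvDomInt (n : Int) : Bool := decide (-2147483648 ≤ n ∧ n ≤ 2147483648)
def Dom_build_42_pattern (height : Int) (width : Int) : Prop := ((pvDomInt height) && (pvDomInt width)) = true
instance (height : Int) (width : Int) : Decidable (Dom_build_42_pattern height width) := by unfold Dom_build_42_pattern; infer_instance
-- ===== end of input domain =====

-- B builds the same '42' cells by scanning two string bitmaps instead of hand-enumerated coordinate lists (idiomatic, same cost).

-- ===== PORT A =====
def build_42_pattern (height : Int) (width : Int) : Option (List (Int × Int)) :=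
  if height < 7 + 2 ∨ width < 11 + 2 then none
  else
    let sr := PySem.Int.floordiv (height - 7) 2
    let sc := PySem.Int.floordiv (width - 11) 2
    let digit_4 : List (Int × Int) :=
      [(0,0),(1,0),(2,0),(2,2),(3,0),(3,1),(3,2),(3,3),(3,4),(4,2),(5,2),(6,2)]
    let digit_2 : List (Int × Int) :=
      [(0,0),(0,1),(0,2),(0,3),(0,4),(1,4),(2,4),(3,0),(3,1),(3,2),(3,3),(3,4),
       (4,0),(5,0),(6,0),(6,1),(6,2),(6,3),(6,4)]
    let cells : List (Int × Int) :=
      digit_4.foldl (fun acc p => acc ++ [(sr + p.1, sc + p.2)]) []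
    let cells :=
      digit_2.foldl (fun acc p => acc ++ [(sr + p.1, sc + 6 + p.2)]) cells
    some cells

-- ===== PORT B =====
def pvDigit4 : List String := ["#", "#", "#.#", "#####", "..#", "..#", "..#"]
def pvDigit2 : List String := ["#####", "....#", "....#", "#####", "#", "#", "#####"]

def build_42_pattern_alt (height : Int) (width : Int) : Option (List (Int × Int)) :=
  if height < 9 ∨ width < 13 then none
  else
    let sr := PySem.Int.floordiv (height - 7) 2
    let sc := PySem.Int.floordiv (width - 11) 2
    let cells :=
      [((0 : Int), pvDigit4), ((6 : Int), pvDigit2)].foldl (fun cells ob =>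
        (PySem.List.enumerate ob.2).foldl (fun cells rrow =>
          (PySem.List.enumerate rrow.2.toList).foldl (fun cells cch =>
            if cch.2 = '#' then cells ++ [(sr + rrow.1, sc + ob.1 + cch.1)]
            else cells) cells) cells) []
    some cells

-- ===== PRECONDITION & SPEC =====
def Spec_build_42_pattern (height : Int) (width : Int) (out : Option (List (Int × Int))) : Prop := out = build_42_pattern_alt height width
instance (height : Int) (width : Int) (out : Option (List (Int × Int))) : Decidable (Spec_build_42_pattern height width out) := by unfold Spec_build_42_pattern; infer_instance

-- ===== CLAIM (what is proved, stated in full; the proofs are below) =====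
def Claim_equal_build_42_pattern : Prop := ∀ (height : Int) (width : Int), Dom_build_42_pattern height width → Spec_build_42_pattern height width (build_42_pattern height width)

-- ===== LEMMAS AND PROOFS =====

-- ===== VERDICT (by name: the statement is the Claim_ definition above) =====
theorem build_42_pattern_spec : Claim_equal_build_42_pattern := by
  intro height width _
  unfold Spec_build_42_pattern build_42_pattern build_42_pattern_alt
  by_cases h : height < 9 ∨ width < 13
  · simp [h]
  · simp only [h, if_false]
    simp [pvDigit4, pvDigit2, PySem.List.enumerate, List.foldl]
    omega
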